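-- pv_equiv track=rewrite | github.com/kahmunleong/gdp-assessment | GDP assessment.py | sum_neighbours
-- ===== SOURCE A (Python) =====
-- def sum_neighbours(nums):
--    # Aim: To calculate sum of neighbours for number[i] from given list.
--    # Input: A list of numbers(num)
--    # Output: A list of the sum of neighbours for number[i] from given list.
--     output = []
--     for i in range(len(nums)):
--         left = nums[:i][-len(nums):] # all numbers on the left of nums[i]
--         right= nums[i+1:len(nums)+i+1] # all numbers on the right of nums[i]
--         new = left + right
--         # Creates n list of neighbour numbers for n numbers in given list
--         output.append(sum(new))
--         # sum all elements in each list and append it to single list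
--     return(output)
-- ===== SOURCE B (Python) =====
-- def sum_neighbours(nums):
--     total = sum(nums)
--     return [total - x for x in nums]
-- ===== Notes on version B (the rewrite author's own statement) =====
-- stated objective: faster
-- what changed: Replaces the per-index slicing-and-summing (two list slices and a full sum per element) by computing the total once and emitting total - nums[i] for each element.
import Mathlib
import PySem

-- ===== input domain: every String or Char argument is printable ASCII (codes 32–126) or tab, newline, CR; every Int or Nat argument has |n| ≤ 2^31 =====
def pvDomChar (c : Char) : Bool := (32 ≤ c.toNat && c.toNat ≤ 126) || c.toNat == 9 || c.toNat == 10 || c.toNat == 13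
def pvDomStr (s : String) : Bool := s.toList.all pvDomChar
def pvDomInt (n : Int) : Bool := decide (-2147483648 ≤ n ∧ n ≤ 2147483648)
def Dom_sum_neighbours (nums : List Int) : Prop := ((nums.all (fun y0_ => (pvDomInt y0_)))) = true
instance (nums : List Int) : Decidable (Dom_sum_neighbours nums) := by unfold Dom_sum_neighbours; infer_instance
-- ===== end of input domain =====

-- B computes the total once and returns total - nums[i] per element instead of slicing and re-summing per index (asymptotically faster).

-- ===== PORT A =====
def sum_neighbours (nums : List Int) : List Int :=
  (PySem.List.pyRange 0 (nums.length : Int) 1).foldl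
    (fun output i =>
      let left := PySem.List.slice (PySem.List.slice nums none (some i)) (some (-(nums.length : Int))) none
      let right := PySem.List.slice nums (some (i + 1)) (some ((nums.length : Int) + i + 1))
      let new := left ++ right
      output ++ [new.sum]) []

-- ===== PORT B =====
def sum_neighbours_alt (nums : List Int) : List Int :=
  let total := nums.sum
  nums.map (fun x => total - x)

-- ===== PRECONDITION & SPEC =====
def Spec_sum_neighbours (nums : List Int) (out : List Int) : Prop := out = sum_neighbours_alt nums
instance (nums : List Int) (out : List Int) : Decidable (Spec_sum_neighbours nums out) := by unfold Spec_sum_neighbours; infer_instance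

-- ===== CLAIM (what is proved, stated in full; the proofs are below) =====
def Claim_equal_sum_neighbours : Prop := ∀ (nums : List Int), Dom_sum_neighbours nums → Spec_sum_neighbours nums (sum_neighbours nums)

-- ===== LEMMAS AND PROOFS =====

-- the body A computes at index k (k < length) is total - nums[k]
theorem sum_neighbours_body (nums : List Int) (k : Nat) (hk : k < nums.length) :
    (PySem.List.slice (PySem.List.slice nums none (some (k : Int))) (some (-(nums.length : Int))) none
      ++ PySem.List.slice nums (some ((k : Int) + 1)) (some ((nums.length : Int) + (k : Int) + 1))).sum
    = nums.sum - nums[k] := by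
  have h1 : PySem.List.slice nums none (some (k : Int)) = nums.take k :=
    PySem.List.slice_to_natCast nums k
  have h2 : PySem.List.slice (nums.take k) (some (-(nums.length : Int))) none
      = (nums.take k).drop ((nums.take k).length - nums.length) :=
    PySem.List.slice_from_neg_natCast _ _ (by omega)
  have h3 : ((k : Int) + 1) = ((k + 1 : Nat) : Int) := by push_cast; ring
  have h4 : ((nums.length : Int) + (k : Int) + 1) = ((nums.length + k + 1 : Nat) : Int) := by
    push_cast; ring
  rw [h1, h2, h3, h4, PySem.List.slice_natCast]
  have hlt : (nums.take k).length - nums.length = 0 := by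
    rw [List.length_take]; omega
  rw [hlt, List.drop_zero]
  have hdrop : nums.drop k = nums[k] :: nums.drop (k + 1) :=
    List.drop_eq_getElem_cons hk
  have htd : (nums.take k).sum + (nums.drop k).sum = nums.sum := by
    rw [← List.sum_append, List.take_append_drop]
  have htk : ((nums.drop (k + 1)).take (nums.length + k + 1 - (k + 1))) = nums.drop (k + 1) := by
    apply List.take_of_length_le
    rw [List.length_drop]; omega
  rw [htk, List.sum_append]
  rw [hdrop, List.sum_cons] at htd
  omega

-- ===== VERDICT (by name: the statement is the Claim_ definition above) =====
theorem sum_neighbours_spec : Claim_equal_sum_neighbours := by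
  intro nums _
  unfold Spec_sum_neighbours sum_neighbours sum_neighbours_alt
  rw [PySem.List.foldl_append_singleton_eq_map]
  rw [PySem.List.pyRange_zero_natCast, List.map_map]
  apply List.ext_getElem
  · simp
  · intro k h1 h2
    have hk : k < nums.length := by simpa using h1
    simp only [List.nil_append, List.getElem_map, List.getElem_range, Function.comp_apply]
    exact sum_neighbours_body nums k hk
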